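-- pv_equiv track=rewrite | github.com/Dharineesh-Somisetty/LabelLens | backend/app/services/scorer.py | _compute_processing_score
-- ===== SOURCE A (Python) =====
-- from typing import Any, Dict, List, Optional
--
-- _PROCESSING_SIGNAL_PENALTIES: Dict[str, float] = {
--     "upf_indicator_modified_starch": 12.0,
--     "upf_indicator_sweetener":       12.0,
--     "upf_indicator_color":            8.0,
--     "upf_indicator_preservative":     5.0,
--     "upf_indicator_flavor":           4.0,
--     "upf_indicator_emulsifier":       4.0,
--     "upf_indicator_hydrogenated":    15.0,
--     "upf_indicator_maltodextrin":     6.0,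
-- }
--
-- _PRESERVATIVE_PENALTY_CAP = 15.0
--
-- _UMBRELLA_PENALTY_CAP = 8.0
--
-- def _compute_processing_score(level: str, signal_tags: List[str]) -> int:
--     """Compute processing score 0-100 from processing level and signal tags.
--
--     Mapping:
--     - minimally_processed => 90
--     - processed => 70
--     - upf_signals => start at 55, subtract per-signal penalties (capped)
--     """
--     if level == "minimally_processed":
--         return 90
--     if level == "processed":
--         return 70
--
--     # upf_signals: start at 55 and subtract
--     score = 55.0
--     preservative_total = 0.0
--     umbrella_total = 0.0
--
--     for tag in signal_tags:
--         if tag == "upf_indicator_preservative":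
--             pen = _PROCESSING_SIGNAL_PENALTIES.get(tag, 3.0)
--             remaining = max(0.0, _PRESERVATIVE_PENALTY_CAP - preservative_total)
--             actual = min(pen, remaining)
--             preservative_total += actual
--             score -= actual
--         elif tag == "upf_indicator_flavor":
--             pen = _PROCESSING_SIGNAL_PENALTIES.get(tag, 3.0)
--             remaining = max(0.0, _UMBRELLA_PENALTY_CAP - umbrella_total)
--             actual = min(pen, remaining)
--             umbrella_total += actual
--             score -= actual
--         else:
--             pen = _PROCESSING_SIGNAL_PENALTIES.get(tag, 3.0)
--             score -= pen
--
--     return max(0, min(100, int(round(score))))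
-- ===== SOURCE B (Python) =====
-- from typing import Dict, List
--
-- _PROCESSING_SIGNAL_PENALTIES: Dict[str, float] = {
--     "upf_indicator_modified_starch": 12.0,
--     "upf_indicator_sweetener":       12.0,
--     "upf_indicator_color":            8.0,
--     "upf_indicator_preservative":     5.0,
--     "upf_indicator_flavor":           4.0,
--     "upf_indicator_emulsifier":       4.0,
--     "upf_indicator_hydrogenated":    15.0,
--     "upf_indicator_maltodextrin":     6.0,
-- }
--
-- _PRESERVATIVE_PENALTY_CAP = 15.0
-- _UMBRELLA_PENALTY_CAP = 8.0
--
--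
-- def _compute_processing_score(level: str, signal_tags: List[str]) -> int:
--     if level == "minimally_processed":
--         return 90
--     if level == "processed":
--         return 70
--     pres = 0
--     flav = 0
--     other = 0.0
--     for tag in signal_tags:
--         if tag == "upf_indicator_preservative":
--             pres += 1
--         elif tag == "upf_indicator_flavor":
--             flav += 1
--         else:
--             other += _PROCESSING_SIGNAL_PENALTIES.get(tag, 3.0)
--     score = (55.0
--              - min(pres * 5.0, _PRESERVATIVE_PENALTY_CAP)
--              - min(flav * 4.0, _UMBRELLA_PENALTY_CAP)
--              - other)
--     return max(0, min(100, int(round(score))))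
-- ===== Notes on version B (the rewrite author's own statement) =====
-- stated objective: simpler
-- what changed: Replaces A's incremental per-tag remaining/actual cap bookkeeping with a count-then-closed-form pass: count preservative and flavor tags, sum the other penalties, then apply min(5*pres,15) and min(4*flav,8) once.
import Mathlib
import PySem

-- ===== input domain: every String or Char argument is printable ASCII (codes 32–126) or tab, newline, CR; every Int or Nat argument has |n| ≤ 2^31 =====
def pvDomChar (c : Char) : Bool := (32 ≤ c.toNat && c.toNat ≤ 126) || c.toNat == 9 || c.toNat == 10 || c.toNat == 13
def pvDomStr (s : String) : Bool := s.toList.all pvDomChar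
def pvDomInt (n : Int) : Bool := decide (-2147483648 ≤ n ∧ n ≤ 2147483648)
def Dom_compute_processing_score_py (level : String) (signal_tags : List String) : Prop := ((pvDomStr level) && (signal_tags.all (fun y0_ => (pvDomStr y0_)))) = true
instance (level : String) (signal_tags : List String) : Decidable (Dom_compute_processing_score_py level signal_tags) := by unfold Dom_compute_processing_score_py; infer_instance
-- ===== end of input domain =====

-- B replaces A's per-tag remaining/actual cap bookkeeping with a count-then-closed-form pass (objective: simpler).
-- Float note: every float in A/B (penalties, caps, 3.0 default, the running score) is integer-valued,
-- so the Int port is exact: round(score) == score and int(round(score)) is that integer.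

-- ===== PORT A =====
-- _PROCESSING_SIGNAL_PENALTIES (all values are integers; ported as Int, exact)
def pvPenalties : PySem.Dict String Int :=
  PySem.Dict.insert (PySem.Dict.insert (PySem.Dict.insert (PySem.Dict.insert
  (PySem.Dict.insert (PySem.Dict.insert (PySem.Dict.insert (PySem.Dict.insert
    (PySem.Dict.empty : PySem.Dict String Int)
    "upf_indicator_modified_starch" 12) "upf_indicator_sweetener" 12)
    "upf_indicator_color" 8) "upf_indicator_preservative" 5)
    "upf_indicator_flavor" 4) "upf_indicator_emulsifier" 4)
    "upf_indicator_hydrogenated" 15) "upf_indicator_maltodextrin" 6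

-- A's loop body: state = (score, preservative_total, umbrella_total)
def pvStepA (st : Int × Int × Int) (tag : String) : Int × Int × Int :=
  if tag = "upf_indicator_preservative" then
    let pen := PySem.Dict.getD pvPenalties tag 3
    let remaining := max 0 (15 - st.2.1)
    let actual := min pen remaining
    (st.1 - actual, st.2.1 + actual, st.2.2)
  else if tag = "upf_indicator_flavor" then
    let pen := PySem.Dict.getD pvPenalties tag 3
    let remaining := max 0 (8 - st.2.2)
    let actual := min pen remaining
    (st.1 - actual, st.2.1, st.2.2 + actual)
  else
    (st.1 - PySem.Dict.getD pvPenalties tag 3, st.2.1, st.2.2)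

def compute_processing_score_py (level : String) (signal_tags : List String) : Int :=
  if level = "minimally_processed" then 90
  else if level = "processed" then 70
  else
    let st := signal_tags.foldl pvStepA (55, 0, 0)
    max 0 (min 100 st.1)

-- ===== PORT B =====
-- B's loop body: state = (pres_count, flav_count, other_total)
def pvStepB (st : Int × Int × Int) (tag : String) : Int × Int × Int :=
  if tag = "upf_indicator_preservative" then (st.1 + 1, st.2.1, st.2.2)
  else if tag = "upf_indicator_flavor" then (st.1, st.2.1 + 1, st.2.2)
  else (st.1, st.2.1, st.2.2 + PySem.Dict.getD pvPenalties tag 3)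

def compute_processing_score_py_alt (level : String) (signal_tags : List String) : Int :=
  if level = "minimally_processed" then 90
  else if level = "processed" then 70
  else
    let c := signal_tags.foldl pvStepB (0, 0, 0)
    let score := 55 - min (c.1 * 5) 15 - min (c.2.1 * 4) 8 - c.2.2
    max 0 (min 100 score)

-- ===== PRECONDITION & SPEC =====
def Spec_compute_processing_score_py (level : String) (signal_tags : List String) (out : Int) : Prop := out = compute_processing_score_py_alt level signal_tags
instance (level : String) (signal_tags : List String) (out : Int) : Decidable (Spec_compute_processing_score_py level signal_tags out) := by unfold Spec_compute_processing_score_py; infer_instance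

-- ===== CLAIM (what is proved, stated in full; the proofs are below) =====
def Claim_equal_compute_processing_score_py : Prop := ∀ (level : String) (signal_tags : List String), Dom_compute_processing_score_py level signal_tags → Spec_compute_processing_score_py level signal_tags (compute_processing_score_py level signal_tags)

-- ===== LEMMAS AND PROOFS =====

-- Loop invariant: A's running state is determined by B's counters.
theorem pv_loop (tags : List String) :
    ∀ (s p f o : Int), 0 ≤ p → 0 ≤ f →
    (tags.foldl pvStepA (s - min (p * 5) 15 - min (f * 4) 8 - o, min (p * 5) 15, min (f * 4) 8)).1
      = (let c := tags.foldl pvStepB (p, f, o);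
         s - min (c.1 * 5) 15 - min (c.2.1 * 4) 8 - c.2.2) := by
  induction tags with
  | nil => intro s p f o _ _; rfl
  | cons t ts ih =>
    intro s p f o hp hf
    simp only [List.foldl_cons]
    by_cases h1 : t = "upf_indicator_preservative"
    · subst h1
      have hpen : PySem.Dict.getD pvPenalties "upf_indicator_preservative" 3 = 5 := by simp [pvPenalties, PySem.Dict.getD, PySem.Dict.get?, PySem.Dict.insert, PySem.Dict.empty]
      simp only [pvStepA, pvStepB, hpen]
      have e1 : min (p * 5) 15 + min 5 (max 0 (15 - min (p * 5) 15)) = min ((p + 1) * 5) 15 := by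
        omega
      have e2 : s - min (p * 5) 15 - min (f * 4) 8 - o - min 5 (max 0 (15 - min (p * 5) 15))
          = s - min ((p + 1) * 5) 15 - min (f * 4) 8 - o := by omega
      rw [e2, e1]
      exact ih s (p + 1) f o (by omega) hf
    · by_cases h2 : t = "upf_indicator_flavor"
      · subst h2
        have hpen : PySem.Dict.getD pvPenalties "upf_indicator_flavor" 3 = 4 := by simp [pvPenalties, PySem.Dict.getD, PySem.Dict.get?, PySem.Dict.insert, PySem.Dict.empty]
        simp only [pvStepA, pvStepB, if_neg (by decide : ¬("upf_indicator_flavor" = "upf_indicator_preservative")), hpen]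
        have e1 : min (f * 4) 8 + min 4 (max 0 (8 - min (f * 4) 8)) = min ((f + 1) * 4) 8 := by
          omega
        have e2 : s - min (p * 5) 15 - min (f * 4) 8 - o - min 4 (max 0 (8 - min (f * 4) 8))
            = s - min (p * 5) 15 - min ((f + 1) * 4) 8 - o := by omega
        rw [e2, e1]
        exact ih s p (f + 1) o hp (by omega)
      · simp only [pvStepA, pvStepB, if_neg h1, if_neg h2]
        have e2 : s - min (p * 5) 15 - min (f * 4) 8 - o - PySem.Dict.getD pvPenalties t 3
            = s - min (p * 5) 15 - min (f * 4) 8 - (o + PySem.Dict.getD pvPenalties t 3) := by ring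
        rw [e2]
        exact ih s p f (o + PySem.Dict.getD pvPenalties t 3) hp hf

-- ===== VERDICT (by name: the statement is the Claim_ definition above) =====
theorem compute_processing_score_py_spec : Claim_equal_compute_processing_score_py := by
  intro level tags _
  unfold Spec_compute_processing_score_py compute_processing_score_py compute_processing_score_py_alt
  by_cases h1 : level = "minimally_processed"
  · simp [h1]
  · by_cases h2 : level = "processed"
    · simp [h2]
    · simp only [if_neg h1, if_neg h2]
      have := pv_loop tags 55 0 0 0 le_rfl le_rfl
      simp only [show min ((0:Int) * 5) 15 = 0 by decide, show min ((0:Int) * 4) 8 = 0 by decide] at this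
      simp only [show (55:Int) - 0 - 0 - 0 = 55 by decide] at this
      rw [this]
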